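-- pv_equiv track=rewrite | github.com/pypi-data/pypi-mirror-199 | packages/ez-parse/ez-parse-0.1.1.tar.gz/ez-parse-0.1.1/Resume-Parser/parser.py | get_honors
-- ===== SOURCE A (Python) =====
-- TAGS = {
--     "Contact",
--     "Top Skills",
--     "Certifications",
--     "Honors-Awards",
--     "Publications",
--     "Summary",
--     "Languages",
--     "Experience",
--     "Education",
-- }
--
-- def get_honors(result_list, i):
--     honors = []
--     for j in range(i + 1, len(result_list)):
--         if len(result_list[j]) == 0:
--             continue
--         elif "Page" in result_list[j]:
--             continue
--         elif result_list[j] not in TAGS: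
--             honors.append(result_list[j].strip())
--         else:
--             return honors, j + 1
-- ===== SOURCE B (Python) =====
-- TAGS = {
--     "Contact",
--     "Top Skills",
--     "Certifications",
--     "Honors-Awards",
--     "Publications",
--     "Summary",
--     "Languages",
--     "Experience",
--     "Education",
-- }
--
-- def get_honors(result_list, i):
--     # Materialise the scanned window once, locate the first section-tag boundary,
--     # then strip-filter the prefix before it.
--     items = [(j, result_list[j]) for j in range(i + 1, len(result_list))]
--     for k, (j, x) in enumerate(items):
--         if x and "Page" not in x and x in TAGS:
--             return [y.strip() for _, y in items[:k] if y and "Page" not in y], j + 1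
--     return None
-- ===== Notes on version B (the rewrite author's own statement) =====
-- stated objective: alternative
-- what changed: A accumulates stripped honors while scanning with an early return; B materialises the scanned (index, element) window once, locates the first section-tag boundary, then strip-filters the prefix before it.
import Mathlib
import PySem

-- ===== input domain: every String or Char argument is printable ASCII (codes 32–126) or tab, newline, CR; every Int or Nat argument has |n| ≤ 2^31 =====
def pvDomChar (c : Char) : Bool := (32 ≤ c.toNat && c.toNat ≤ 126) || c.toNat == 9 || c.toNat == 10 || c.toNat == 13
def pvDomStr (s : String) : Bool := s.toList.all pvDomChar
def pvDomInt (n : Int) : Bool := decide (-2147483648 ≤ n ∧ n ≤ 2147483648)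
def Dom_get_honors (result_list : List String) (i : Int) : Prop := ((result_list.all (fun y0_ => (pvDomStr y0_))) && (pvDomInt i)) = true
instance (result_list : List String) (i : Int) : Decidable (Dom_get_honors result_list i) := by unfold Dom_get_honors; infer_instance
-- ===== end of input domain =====

-- B replaces A's accumulate-while-scanning loop by: materialise the window, find the boundary, filter the prefix (objective: alternative, same cost).

-- ===== PORT A =====
def pvTAGS : List String := PySem.Set.ofList ["Contact", "Top Skills", "Certifications", "Honors-Awards", "Publications", "Summary", "Languages", "Experience", "Education"]

-- A's for-loop with early return; IndexError (pyGet? = none) is mapped to none (excluded by Pre_).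
def pvGoA (result_list : List String) (js : List Int) (honors : List String) : Option (List String × Int) :=
  match js with
  | [] => none
  | j :: rest =>
    match PySem.List.pyGet? result_list j with
    | none => none
    | some x =>
      if PySem.Str.len x = 0 then pvGoA result_list rest honors
      else if PySem.Str.isIn "Page" x then pvGoA result_list rest honors
      else if ¬ (x ∈ pvTAGS) then pvGoA result_list rest (honors ++ [PySem.Str.strip x])
      else some (honors, j + 1)

def get_honors (result_list : List String) (i : Int) : Option (List String × Int) :=
  pvGoA result_list (PySem.List.pyRange (i + 1) (result_list.length : Int) 1) []

-- ===== PORT B =====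
-- the boundary test 'x and "Page" not in x and x in TAGS'
def pvIsTag (x : String) : Bool := x ≠ "" && !(PySem.Str.isIn "Page" x) && x ∈ pvTAGS

-- the prefix filter '[y.strip() for _, y in items[:k] if y and "Page" not in y]'
def pvFiltStrip (items : List (Int × String)) : List String :=
  (items.filter (fun p => p.2 ≠ "" && !(PySem.Str.isIn "Page" p.2))).map (fun p => PySem.Str.strip p.2)

-- B's enumerate loop: seen = items[:k]
def pvGoB (items : List (Int × String)) (seen : List (Int × String)) : Option (List String × Int) :=
  match items with
  | [] => none
  | (j, x) :: rest =>
    if pvIsTag x then some (pvFiltStrip seen, j + 1)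
    else pvGoB rest (seen ++ [(j, x)])

def get_honors_alt (result_list : List String) (i : Int) : Option (List String × Int) :=
  let items := (PySem.List.pyRange (i + 1) (result_list.length : Int) 1).map
    (fun j => (j, PySem.List.pyGetD result_list j ""))
  pvGoB items []

-- ===== PRECONDITION & SPEC =====
-- exactly the inputs on which A returns: otherwise result_list[j] raises IndexError for some j < -len(result_list)
def Pre_get_honors (result_list : List String) (i : Int) : Prop :=
  -(result_list.length : Int) ≤ i + 1
instance (result_list : List String) (i : Int) : Decidable (Pre_get_honors result_list i) := by unfold Pre_get_honors; infer_instance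

def pvWitness_get_honors : List String × Int := (["Summary", "won prize ", "", "Page 2", "Education"], 0)

def Spec_get_honors (result_list : List String) (i : Int) (out : Option (List String × Int)) : Prop := out = get_honors_alt result_list i
instance (result_list : List String) (i : Int) (out : Option (List String × Int)) : Decidable (Spec_get_honors result_list i out) := by unfold Spec_get_honors; infer_instance

-- ===== CLAIM =====
def Claim_equal_get_honors : Prop := ∀ (result_list : List String) (i : Int), Dom_get_honors result_list i → Pre_get_honors result_list i → Spec_get_honors result_list i (get_honors result_list i)

-- ===== LEMMAS AND PROOFS =====

-- pvFiltStrip over an appended element: dropped when empty or containing "Page"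
lemma pvFiltStrip_skip (seen : List (Int × String)) (j : Int) (x : String)
    (h : x = "" ∨ PySem.Str.isIn "Page" x = true) :
    pvFiltStrip (seen ++ [(j, x)]) = pvFiltStrip seen := by
  rcases h with h | h
  · simp [pvFiltStrip, h]
  · have h' : PySem.Chars.isIn ['P', 'a', 'g', 'e'] x.toList = true := by
      have e : "Page".toList = ['P', 'a', 'g', 'e'] := rfl
      simpa [e] using h
    simp [pvFiltStrip, h']

-- pvFiltStrip over an appended element: kept (stripped) otherwise
lemma pvFiltStrip_keep (seen : List (Int × String)) (j : Int) (x : String)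
    (h0 : x ≠ "") (hp : PySem.Str.isIn "Page" x = false) :
    pvFiltStrip (seen ++ [(j, x)]) = pvFiltStrip seen ++ [PySem.Str.strip x] := by
  have hp2 : PySem.Chars.isIn ['P', 'a', 'g', 'e'] x.toList = false := by
    have e : "Page".toList = ['P', 'a', 'g', 'e'] := rfl
    simpa [e] using hp
  simp [pvFiltStrip, h0, hp2]

-- core invariant: A's loop with honors = pvFiltStrip seen equals B's loop, for in-range indices
lemma pvGo_eq (result_list : List String) (js : List Int)
    (hjs : ∀ j ∈ js, PySem.Raise.InRange result_list.length j)
    (seen : List (Int × String)) :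
    pvGoA result_list js (pvFiltStrip seen)
      = pvGoB (js.map (fun j => (j, PySem.List.pyGetD result_list j ""))) seen := by
  induction js generalizing seen with
  | nil => simp [pvGoA, pvGoB]
  | cons j rest ih =>
    have hin : PySem.Raise.InRange result_list.length j := hjs j (by simp)
    have hget : PySem.List.pyGet? result_list j
        = some (PySem.List.pyGetD result_list j "") := by
      cases hg : PySem.List.pyGet? result_list j with
      | none =>
        exact absurd hin (by simpa using (PySem.List.pyGet?_eq_none_iff (xs := result_list) (i := j)).mp hg)
      | some v => simp [PySem.List.pyGetD, hg]
    set x := PySem.List.pyGetD result_list j "" with hx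
    have ihrest : ∀ s, pvGoA result_list rest (pvFiltStrip s)
        = pvGoB (rest.map (fun j => (j, PySem.List.pyGetD result_list j ""))) s :=
      fun s => ih (fun a ha => hjs a (by simp [ha])) s
    simp only [pvGoA, pvGoB, List.map_cons, hget]
    rw [← hx]
    by_cases h0 : x = ""
    · have e1 : PySem.Str.len x = 0 := by simp [h0]
      have htag : pvIsTag x = false := by simp [pvIsTag, h0]
      have hrec := ihrest (seen ++ [(j, x)])
      rw [pvFiltStrip_skip seen j x (Or.inl h0)] at hrec
      rw [if_pos e1, if_neg (by simp [htag])]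
      exact hrec
    · have e1 : ¬ PySem.Str.len x = 0 := by simp [PySem.Str.len_eq, h0]
      by_cases hp : PySem.Str.isIn "Page" x = true
      · have htag : pvIsTag x = false := by unfold pvIsTag; rw [hp]; simp
        have hrec := ihrest (seen ++ [(j, x)])
        rw [pvFiltStrip_skip seen j x (Or.inr hp)] at hrec
        rw [if_neg e1, if_pos hp, if_neg (by simp [htag])]
        exact hrec
      · have hp' : PySem.Str.isIn "Page" x = false := by simpa using hp
        by_cases ht : x ∈ pvTAGS
        · have htag : pvIsTag x = true := by unfold pvIsTag; rw [hp']; simp [h0, ht]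
          rw [if_neg e1, if_neg hp, if_neg (by simp [ht]), if_pos (by simp [htag])]
        · have htag : pvIsTag x = false := by unfold pvIsTag; rw [hp']; simp [ht]
          have hrec := ihrest (seen ++ [(j, x)])
          rw [pvFiltStrip_keep seen j x h0 hp'] at hrec
          rw [if_neg e1, if_neg hp, if_pos ht, if_neg (by simp [htag])]
          exact hrec

-- ===== VERDICT =====
theorem get_honors_spec : Claim_equal_get_honors := by
  intro result_list i _ hpre
  unfold Spec_get_honors get_honors get_honors_alt
  have hjs : ∀ j ∈ PySem.List.pyRange (i + 1) (result_list.length : Int) 1,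
      PySem.Raise.InRange result_list.length j := by
    intro j hj
    have := (PySem.List.mem_pyRange_one).mp hj
    unfold Pre_get_honors at hpre
    constructor <;> omega
  have := pvGo_eq result_list (PySem.List.pyRange (i + 1) (result_list.length : Int) 1) hjs []
  simpa [pvFiltStrip] using this
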